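-- pv_equiv track=rewrite | github.com/fatema1234/Thesis | stemming.py | _r1_scandinavian
-- ===== SOURCE A (Python) =====
-- def _r1_scandinavian(word, vowels):
--   """
--   Return the region R1 that is used by the Scandinavian stemmers.
--
--   R1 is the region after the first non-vowel following a vowel,
--   or is the null region at the end of the word if there is no
--   such non-vowel. But then R1 is adjusted so that the region
--   before it contains at least three letters.
--
--   :param word: The word whose region R1 is determined.
--   :type word: str or unicode
--   :param vowels: The vowels of the respective language that are
--                  used to determine the region R1.
--   :type vowels: unicode
--   :return: the region R1 for the respective word.
--   :rtype: unicode
--   :note: This helper method is invoked by the respective stem method of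
--          the subclasses DanishStemmer, NorwegianStemmer, and
--          SwedishStemmer. It is not to be invoked directly!
--
--   """
--   r1 = ""
--   for i in range(1, len(word)):
--     if word[i] not in vowels and word[i - 1] in vowels:
--       if 3 > len(word[: i + 1]) > 0:
--         r1 = word[3:]
--       elif len(word[: i + 1]) >= 3:
--         r1 = word[i + 1:]
--       else:
--         return word
--       break
--
--   return r1
-- ===== SOURCE B (Python) =====
-- import re
--
--
-- def _r1_scandinavian(word, vowels):
--     # Locate the first vowel/non-vowel boundary with a regex, then take one
--     # max-based slice instead of A's index loop with three branches.
--     if not vowels: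
--         return ""
--     pattern = "[%s][^%s]" % (re.escape(vowels), re.escape(vowels))
--     m = re.search(pattern, word)
--     if m is None:
--         return ""
--     return word[max(m.end(), 3):]
-- ===== Notes on version B (the rewrite author's own statement) =====
-- stated objective: idiomatic
-- what changed: A's explicit index loop with three slice branches is replaced by a single regex search for the first vowel/non-vowel boundary and one max-based slice word[max(m.end(), 3):].
import Mathlib
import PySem

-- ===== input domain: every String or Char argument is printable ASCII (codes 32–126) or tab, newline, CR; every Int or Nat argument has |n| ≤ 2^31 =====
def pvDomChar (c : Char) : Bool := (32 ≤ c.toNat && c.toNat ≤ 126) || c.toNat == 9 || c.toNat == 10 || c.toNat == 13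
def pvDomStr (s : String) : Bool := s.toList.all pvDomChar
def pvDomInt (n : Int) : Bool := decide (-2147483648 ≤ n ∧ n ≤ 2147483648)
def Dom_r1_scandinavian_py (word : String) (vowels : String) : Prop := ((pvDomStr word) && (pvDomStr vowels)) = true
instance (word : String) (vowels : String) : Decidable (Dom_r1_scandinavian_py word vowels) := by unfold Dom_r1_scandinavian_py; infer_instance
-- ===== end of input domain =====

-- B replaces A's indexed loop with three slice branches by a leftmost vowel/non-vowel
-- boundary search (a regex in Python) followed by a single max-based slice (idiomatic).


-- ===== PORT A =====
-- the for-loop over range(1, len(word)) with break/return; 'c in vowels' on the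
-- one-char string word[i] is Python substring membership → PySem.Chars.isIn [c]
def r1AuxLoop (w v : List Char) : List Int → List Char
  | [] => []  -- loop finishes without break: r1 stays ""
  | i :: rest =>
    if PySem.Chars.isIn [PySem.List.pyGetD w i ' '] v = false ∧
       PySem.Chars.isIn [PySem.List.pyGetD w (i - 1) ' '] v = true then
      let pre := PySem.List.slice w none (some (i + 1))
      if 3 > pre.length ∧ pre.length > 0 then PySem.List.slice w (some 3) none
      else if pre.length ≥ 3 then PySem.List.slice w (some (i + 1)) none
      else w
    else r1AuxLoop w v rest

def r1_scandinavian_py (word : String) (vowels : String) : String :=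
  String.ofList (r1AuxLoop word.toList vowels.toList
    (PySem.List.pyRange 1 (word.toList.length : Int) 1))

-- ===== PORT B =====
-- hand port of re.search("[V][^V]", word): the regex matches at the leftmost index j
-- with word[j] ∈ vowels and word[j+1] ∉ vowels, and m.end() = j + 2; exact for this
-- pattern (two single-character classes, no backtracking). Returns m.end(), none = no match.
def r1Search (v : List Char) : List Char → Option Nat
  | [] => none
  | [_] => none
  | a :: b :: rest =>
    if a ∈ v ∧ b ∉ v then some 2
    else (r1Search v (b :: rest)).map (· + 1)

def r1_scandinavian_py_alt (word : String) (vowels : String) : String :=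
  if vowels.toList = [] then ""
  else
    match r1Search vowels.toList word.toList with
    | none => ""
    | some e =>
        String.ofList (PySem.List.slice word.toList (some ((max e 3 : Nat) : Int)) none)

-- ===== PRECONDITION & SPEC =====
def Spec_r1_scandinavian_py (word : String) (vowels : String) (out : String) : Prop := out = r1_scandinavian_py_alt word vowels
instance (word : String) (vowels : String) (out : String) : Decidable (Spec_r1_scandinavian_py word vowels out) := by unfold Spec_r1_scandinavian_py; infer_instance

-- ===== CLAIM (what is proved, stated in full; the proofs are below) =====
def Claim_equal_r1_scandinavian_py : Prop := ∀ (word : String) (vowels : String), Dom_r1_scandinavian_py word vowels → Spec_r1_scandinavian_py word vowels (r1_scandinavian_py word vowels)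

-- ===== LEMMAS AND PROOFS =====

lemma r1Search_short (v l : List Char) (h : l.length ≤ 1) : r1Search v l = none := by
  match l with
  | [] => rfl
  | [_] => rfl
  | a :: b :: rest => simp at h

lemma r1AuxLoop_eq (w v : List Char) :
    ∀ m k : Nat, 1 ≤ k → w.length - k = m →
      r1AuxLoop w v (PySem.List.pyRange (k : Int) (w.length : Int) 1) =
        match r1Search v (w.drop (k - 1)) with
        | none => []
        | some e => w.drop (max ((k - 1) + e) 3) := by
  intro m
  induction m with
  | zero =>
    intro k hk hm
    have hnk : w.length ≤ k := by omega
    have hrange : PySem.List.pyRange (k : Int) (w.length : Int) 1 = [] :=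
      PySem.List.pyRange_one_eq_nil (by exact_mod_cast hnk)
    have hshort : (w.drop (k - 1)).length ≤ 1 := by
      simp [List.length_drop]; omega
    rw [hrange, r1Search_short v _ hshort]
    rfl
  | succ m ih =>
    intro k hk hm
    have hkn : k < w.length := by omega
    have hk1 : k - 1 < w.length := by omega
    have hdrop1 : w.drop (k - 1) = w[k - 1] :: w.drop (k - 1 + 1) :=
      List.drop_eq_getElem_cons hk1
    have hk1e : k - 1 + 1 = k := by omega
    have hdrop2 : w.drop k = w[k] :: w.drop (k + 1) :=
      List.drop_eq_getElem_cons hkn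
    have hrange : PySem.List.pyRange (k : Int) (w.length : Int) 1 =
        (k : Int) :: PySem.List.pyRange ((k : Int) + 1) (w.length : Int) 1 :=
      PySem.List.pyRange_one_cons (by exact_mod_cast hkn)
    rw [hrange]
    have hgetk : PySem.List.pyGetD w (k : Int) ' ' = w[k] := by
      simp [PySem.List.pyGetD_natCast, List.getD_eq_getElem?_getD, hkn]
    have hgetk1 : PySem.List.pyGetD w ((k : Int) - 1) ' ' = w[k - 1] := by
      have : (k : Int) - 1 = ((k - 1 : Nat) : Int) := by omega
      rw [this]
      simp [PySem.List.pyGetD_natCast, List.getD_eq_getElem?_getD, hk1]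
    have hmem : ∀ c : Char, (PySem.Chars.isIn [c] v = true) ↔ c ∈ v := by
      intro c; rw [PySem.Chars.isIn_iff_infix]; exact List.singleton_infix_iff c v
    show (if PySem.Chars.isIn [PySem.List.pyGetD w (k : Int) ' '] v = false ∧
       PySem.Chars.isIn [PySem.List.pyGetD w ((k : Int) - 1) ' '] v = true then
      let pre := PySem.List.slice w none (some ((k : Int) + 1))
      if 3 > pre.length ∧ pre.length > 0 then PySem.List.slice w (some 3) none
      else if pre.length ≥ 3 then PySem.List.slice w (some ((k : Int) + 1)) none
      else w
    else r1AuxLoop w v (PySem.List.pyRange ((k : Int) + 1) (w.length : Int) 1)) = _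
    rw [hgetk, hgetk1]
    by_cases hcond : w[k - 1] ∈ v ∧ w[k] ∉ v
    · -- the boundary is found at consonant index k
      have hbool : PySem.Chars.isIn [w[k]] v = false ∧ PySem.Chars.isIn [w[k - 1]] v = true := by
        constructor
        · rw [Bool.eq_false_iff, Ne, hmem]; exact hcond.2
        · rw [hmem]; exact hcond.1
      rw [if_pos hbool]
      have hsearch : r1Search v (w.drop (k - 1)) = some 2 := by
        rw [hdrop1, hk1e, hdrop2, r1Search]
        rw [if_pos hcond]
      rw [hsearch]
      have hpre : (PySem.List.slice w none (some ((k : Int) + 1))).length = k + 1 := by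
        have : (k : Int) + 1 = ((k + 1 : Nat) : Int) := by omega
        rw [this, PySem.List.slice_to_natCast]
        simp [List.length_take]; omega
      simp only [hpre]
      have hslice : PySem.List.slice w (some ((k : Int) + 1)) none = w.drop (k + 1) := by
        have : (k : Int) + 1 = ((k + 1 : Nat) : Int) := by omega
        rw [this, PySem.List.slice_from_natCast]
      have hslice3 : PySem.List.slice w (some 3) none = w.drop 3 := by
        rw [show (3 : Int) = ((3 : Nat) : Int) from rfl, PySem.List.slice_from_natCast]
      rcases Nat.lt_or_ge (k + 1) 3 with h3 | h3
      · rw [if_pos ⟨h3, by omega⟩, hslice3]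
        have : max (k - 1 + 2) 3 = 3 := by omega
        rw [this]
      · rw [if_neg (by omega), if_pos h3, hslice]
        have : max (k - 1 + 2) 3 = k + 1 := by omega
        rw [this]
    · -- no boundary at k: the loop continues with k+1
      have hbool : ¬ (PySem.Chars.isIn [w[k]] v = false ∧ PySem.Chars.isIn [w[k - 1]] v = true) := by
        intro ⟨h1, h2⟩
        exact hcond ⟨(hmem _).mp h2, fun hm => by rw [(hmem _).mpr hm] at h1; cases h1⟩
      rw [if_neg hbool]
      have hsearch : r1Search v (w.drop (k - 1)) =
          (r1Search v (w.drop k)).map (· + 1) := by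
        rw [hdrop1, hk1e, hdrop2, r1Search, if_neg hcond, ← hdrop2]
      have hcast : (k : Int) + 1 = ((k + 1 : Nat) : Int) := by omega
      rw [hcast, ih (k + 1) (by omega) (by omega), hsearch]
      cases hres : r1Search v (w.drop k) with
      | none => simp only [Nat.add_sub_cancel, hres, Option.map_none]
      | some e =>
        simp only [Nat.add_sub_cancel, hres, Option.map_some]
        have h1 : k + e = k - 1 + (e + 1) := by omega
        rw [h1]

lemma r1Search_nil_vowels : ∀ l : List Char, r1Search [] l = none
  | [] => rfl
  | [_] => rfl
  | a :: b :: rest => by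
      rw [r1Search, if_neg (by simp), r1Search_nil_vowels (b :: rest)]
      rfl

-- ===== VERDICT (by name: the statement is the Claim_ definition above) =====
theorem r1_scandinavian_py_spec : Claim_equal_r1_scandinavian_py := by
  unfold Claim_equal_r1_scandinavian_py
  intro word vowels _
  unfold Spec_r1_scandinavian_py r1_scandinavian_py r1_scandinavian_py_alt
  have h := r1AuxLoop_eq word.toList vowels.toList (word.toList.length - 1) 1
    (le_refl 1) rfl
  simp only [Nat.cast_one, show (1 : Nat) - 1 = 0 from rfl, Nat.zero_add,
    List.drop_zero] at h
  rw [h]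
  by_cases hv : vowels.toList = []
  · rw [if_pos hv, hv, r1Search_nil_vowels]
  · rw [if_neg hv]
    cases hres : r1Search vowels.toList word.toList with
    | none => rfl
    | some e =>
        show String.ofList (List.drop (max e 3) word.toList) =
          String.ofList (PySem.List.slice word.toList (some ((max e 3 : Nat) : Int)) none)
        rw [PySem.List.slice_from_natCast]
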